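-- pv_equiv track=rewrite | github.com/yves-chevallier/texsmith | templates/carauma/__init__.py | _extract_dropcap
-- ===== SOURCE A (Python) =====
-- def _extract_dropcap(
--
--     text: str,
-- ) -> tuple[str | None, str, str, str]:
--     if not isinstance(text, str):
--         return (None, "", "", "")
--     if not text:
--         return (None, "", "", "")
--
--     length = len(text)
--     whitespace_end = 0
--     while whitespace_end < length and text[whitespace_end].isspace():
--         whitespace_end += 1
--     prefix = text[:whitespace_end]
--
--     index = whitespace_end
--     punctuation = ""
--     while index < length and not text[index].isalpha():
--         punctuation += text[index]
--         index += 1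
--     if index >= length:
--         return (None, "", text, "")
--
--     letter = text[index]
--     index += 1
--     word_end = index
--     while word_end < length and text[word_end].isalpha():
--         word_end += 1
--     tail = text[index:word_end]
--     remainder = text[word_end:]
--     body = f"{prefix}{punctuation}{remainder}"
--     consumed = text[:word_end]
--     return (letter, tail, body, consumed)
-- ===== SOURCE B (Python) =====
-- def _runs(text):
--     # Run-length grouping of the text into maximal alpha / non-alpha chunks.
--     runs = []
--     i = 0
--     n = len(text)
--     while i < n:
--         a = text[i].isalpha()
--         j = i + 1
--         while j < n and text[j].isalpha() == a:
--             j += 1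
--         runs.append((a, text[i:j]))
--         i = j
--     return runs
--
-- def _assemble(runs):
--     # Walk the runs; the first alpha run supplies the dropcap, everything else
--     # (the runs before it and the runs after it) is joined back into the body.
--     parts = []
--     for pos, (a, chunk) in enumerate(runs):
--         if a:
--             joined = "".join(parts)
--             after = "".join(ch for _, ch in runs[pos + 1:])
--             return (chunk[0], chunk[1:], joined + after, joined + chunk)
--         parts.append(chunk)
--     return (None, "", "".join(parts), "")
--
-- def _extract_dropcap(
--     text: str,
-- ) -> tuple[str | None, str, str, str]:
--     if not isinstance(text, str):
--         return (None, "", "", "")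
--     return _assemble(_runs(text))
-- ===== Notes on version B (the rewrite author's own statement) =====
-- stated objective: alternative
-- what changed: B first groups the text into a list of maximal alpha/non-alpha runs (run-length grouping), then one fold over that run list emits the result at the first alpha run, joining the untouched runs back into the body; A's three sequential index-tracking while-loops and slice arithmetic disappear.
import Mathlib
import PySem

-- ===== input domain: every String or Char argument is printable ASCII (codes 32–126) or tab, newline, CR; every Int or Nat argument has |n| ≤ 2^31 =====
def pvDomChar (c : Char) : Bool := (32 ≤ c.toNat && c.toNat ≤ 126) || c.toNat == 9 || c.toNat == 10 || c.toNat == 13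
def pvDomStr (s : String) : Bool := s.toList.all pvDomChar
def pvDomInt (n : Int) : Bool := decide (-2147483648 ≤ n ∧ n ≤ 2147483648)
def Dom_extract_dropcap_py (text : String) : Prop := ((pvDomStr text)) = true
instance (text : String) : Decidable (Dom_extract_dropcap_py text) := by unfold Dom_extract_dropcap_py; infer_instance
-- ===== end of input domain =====

-- B replaces A's three index-tracking while-loops and string reassembly with a
-- run-length grouping of the text into maximal alpha/non-alpha chunks followed by
-- a recursive fold over the runs (objective: alternative decomposition).

-- ===== PORT A =====
-- 'while whitespace_end < length and text[whitespace_end].isspace(): whitespace_end += 1'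
def pvAWsLoop : List Char → Nat → Nat
  | [], i => i
  | c :: cs, i => if PySem.Chars.isspace c then pvAWsLoop cs (i + 1) else i

-- 'while index < length and not text[index].isalpha(): punctuation += text[index]; index += 1'
def pvAPuncLoop : List Char → Nat → List Char × Nat
  | [], i => ([], i)
  | c :: cs, i =>
      if PySem.Chars.isalpha c then ([], i)
      else
        let r := pvAPuncLoop cs (i + 1)
        (c :: r.1, r.2)

-- 'while word_end < length and text[word_end].isalpha(): word_end += 1'
def pvAWordLoop : List Char → Nat → Nat
  | [], w => w
  | c :: cs, w => if PySem.Chars.isalpha c then pvAWordLoop cs (w + 1) else w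

def extract_dropcap_py (text : String) : Option String × String × String × String :=
  let cs := text.toList
  if cs = [] then (none, "", "", "")
  else
    let whitespace_end := pvAWsLoop cs 0
    let prefixStr := PySem.List.slice cs none (some (whitespace_end : Int))
    let pi := pvAPuncLoop (cs.drop whitespace_end) whitespace_end
    let punctuation := pi.1
    let index := pi.2
    if cs.length ≤ index then (none, "", text, "")
    else
      -- index < length here, so the getD default is never used (text[index])
      let letter := cs.getD index ' '
      let index1 := index + 1
      let word_end := pvAWordLoop (cs.drop index1) index1
      let tail := PySem.List.slice cs (some (index1 : Int)) (some (word_end : Int))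
      let remainder := PySem.List.slice cs (some (word_end : Int)) none
      let body := prefixStr ++ punctuation ++ remainder
      let consumed := PySem.List.slice cs none (some (word_end : Int))
      (some (String.ofList [letter]), String.ofList tail, String.ofList body, String.ofList consumed)

-- ===== PORT B =====
-- 'while rest and rest[0].isalpha() == a: chunk += rest[0]; rest = rest[1:]'
-- (returns the characters appended to chunk, and the final rest)
def pvSpanLoop (a : Bool) : List Char → List Char × List Char
  | [] => ([], [])
  | c :: cs =>
      if PySem.Chars.isalpha c == a then
        let r := pvSpanLoop a cs
        (c :: r.1, r.2)
      else ([], c :: cs)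

-- termination helper for pvRuns (cited in its decreasing_by)
lemma pvSpanLoop_snd_le (a : Bool) (cs : List Char) :
    (pvSpanLoop a cs).2.length ≤ cs.length := by
  induction cs with
  | nil => simp [pvSpanLoop]
  | cons c cs ih =>
    by_cases h : PySem.Chars.isalpha c == a
    · simpa [pvSpanLoop, h] using Nat.le_succ_of_le ih
    · simp [pvSpanLoop, h]

-- '_runs': run-length grouping into maximal alpha/non-alpha chunks
def pvRuns : List Char → List (Bool × List Char)
  | [] => []
  | c :: cs =>
      let a := PySem.Chars.isalpha c
      let s := pvSpanLoop a cs
      (a, c :: s.1) :: pvRuns s.2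
  termination_by cs => cs.length
  decreasing_by
    exact Nat.lt_succ_of_le (pvSpanLoop_snd_le _ _)

-- '_assemble(runs)': the for-loop over runs, with its 'parts' accumulator
def pvAssemble : List (Bool × List Char) → List (List Char) → Option String × String × String × String
  | [], parts => (none, "", String.ofList parts.flatten, "")   -- '"".join(parts)'
  | (a, chunk) :: rs, parts =>
      if a then
        let joined := parts.flatten                              -- '"".join(parts)'
        let after := (rs.map Prod.snd).flatten                   -- '"".join(ch for _, ch in runs[pos+1:])'
        ((PySem.List.pyGet? chunk 0).map (fun c => String.ofList [c]),   -- chunk[0]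
         String.ofList (chunk.drop 1),                                   -- chunk[1:]
         String.ofList (joined ++ after),
         String.ofList (joined ++ chunk))
      else pvAssemble rs (parts ++ [chunk])

def extract_dropcap_py_alt (text : String) : Option String × String × String × String :=
  pvAssemble (pvRuns text.toList) []

-- ===== PRECONDITION & SPEC =====
def Spec_extract_dropcap_py (text : String) (out : Option String × String × String × String) : Prop := out = extract_dropcap_py_alt text
instance (text : String) (out : Option String × String × String × String) : Decidable (Spec_extract_dropcap_py text out) := by unfold Spec_extract_dropcap_py; infer_instance

-- ===== CLAIM (what is proved, stated in full; the proofs are below) =====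
def Claim_equal_extract_dropcap_py : Prop := ∀ (text : String), Dom_extract_dropcap_py text → Spec_extract_dropcap_py text (extract_dropcap_py text)

-- ===== LEMMAS AND PROOFS =====

-- canonical form both ports are reduced to
def pvCanon (acc cs : List Char) : Option String × String × String × String :=
  match cs.dropWhile (fun c => !PySem.Chars.isalpha c) with
  | [] => (none, "", String.ofList (acc ++ cs), "")
  | l :: t =>
      let T := cs.takeWhile (fun c => !PySem.Chars.isalpha c)
      let w := t.takeWhile PySem.Chars.isalpha
      let r := t.dropWhile PySem.Chars.isalpha
      (some (String.ofList [l]), String.ofList w,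
       String.ofList (acc ++ T ++ r), String.ofList (acc ++ T ++ l :: w))

lemma pv_space_not_alpha (c : Char) (h : PySem.Chars.isspace c = true) :
    PySem.Chars.isalpha c = false := by
  unfold PySem.Chars.isspace at h
  unfold PySem.Chars.isalpha PySem.Chars.isupper PySem.Chars.islower
  simp only [Char.le_def, UInt32.le_iff_toNat_le, Char.toNat, decide_eq_true_eq,
    Bool.or_eq_true, Bool.and_eq_true] at h ⊢
  simp only [Bool.or_eq_false_iff, Bool.and_eq_false_iff, decide_eq_false_iff_not, not_le,
    show 'A'.val.toNat = 65 from rfl, show 'Z'.val.toNat = 90 from rfl,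
    show 'a'.val.toNat = 97 from rfl, show 'z'.val.toNat = 122 from rfl]
  omega

lemma pv_ws_loop_eq (cs : List Char) (i : Nat) :
    pvAWsLoop cs i = i + (cs.takeWhile PySem.Chars.isspace).length := by
  induction cs generalizing i with
  | nil => simp [pvAWsLoop]
  | cons c cs ih =>
    by_cases h : PySem.Chars.isspace c = true
    · simp [pvAWsLoop, h, ih]; omega
    · simp [pvAWsLoop, h]

lemma pv_punc_loop_eq (cs : List Char) (i : Nat) :
    pvAPuncLoop cs i = (cs.takeWhile (fun c => !PySem.Chars.isalpha c),
      i + (cs.takeWhile (fun c => !PySem.Chars.isalpha c)).length) := by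
  induction cs generalizing i with
  | nil => simp [pvAPuncLoop]
  | cons c cs ih =>
    by_cases h : PySem.Chars.isalpha c = true
    · simp [pvAPuncLoop, h]
    · simp only [Bool.not_eq_true] at h
      simp [pvAPuncLoop, h, ih]; omega

lemma pv_word_loop_eq (cs : List Char) (w : Nat) :
    pvAWordLoop cs w = w + (cs.takeWhile PySem.Chars.isalpha).length := by
  induction cs generalizing w with
  | nil => simp [pvAWordLoop]
  | cons c cs ih =>
    by_cases h : PySem.Chars.isalpha c = true
    · simp [pvAWordLoop, h, ih]; omega
    · simp only [Bool.not_eq_true] at h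
      simp [pvAWordLoop, h]

lemma pv_tw_combine (cs : List Char) :
    cs.takeWhile PySem.Chars.isspace ++
      (cs.dropWhile PySem.Chars.isspace).takeWhile (fun c => !PySem.Chars.isalpha c)
      = cs.takeWhile (fun c => !PySem.Chars.isalpha c) := by
  induction cs with
  | nil => simp
  | cons c cs ih =>
    by_cases h : PySem.Chars.isspace c = true
    · simp [h, pv_space_not_alpha c h, ih]
    · simp only [Bool.not_eq_true] at h
      simp [h]

lemma pv_drop_takeWhile (q : Char → Bool) (l : List Char) :
    l.drop (l.takeWhile q).length = l.dropWhile q := by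
  induction l with
  | nil => simp
  | cons c cs ih => by_cases h : q c = true <;> simp [h, ih]

lemma pv_take_takeWhile (q : Char → Bool) (l : List Char) :
    l.take (l.takeWhile q).length = l.takeWhile q := by
  induction l with
  | nil => simp
  | cons c cs ih => by_cases h : q c = true <;> simp [h, ih]

-- ---- A = canon ----
lemma pvA_eq_canon (text : String) :
    extract_dropcap_py text = pvCanon [] text.toList := by
  unfold extract_dropcap_py pvCanon
  dsimp only
  set cs := text.toList with hcs
  by_cases hd : cs.dropWhile (fun c => !PySem.Chars.isalpha c) = []
  · have htw : cs.takeWhile (fun c => !PySem.Chars.isalpha c) = cs := by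
      have := List.takeWhile_append_dropWhile (p := fun c => !PySem.Chars.isalpha c) (l := cs)
      rw [hd, List.append_nil] at this; exact this
    rw [hd]
    by_cases hnil : cs = []
    · simp [hnil]
    · rw [if_neg hnil]
      simp only [pv_ws_loop_eq, Nat.zero_add, pv_punc_loop_eq, pv_drop_takeWhile]
      rw [if_pos ?_]
      · have : String.ofList cs = text := by rw [hcs]; simp
        simp [this]
      · have := congrArg List.length (pv_tw_combine cs)
        rw [htw, List.length_append] at this
        omega
  · obtain ⟨l, t, hD⟩ : ∃ l t, cs.dropWhile (fun c => !PySem.Chars.isalpha c) = l :: t := by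
      cases h : cs.dropWhile (fun c => !PySem.Chars.isalpha c) with
      | nil => exact absurd h hd
      | cons l t => exact ⟨l, t, rfl⟩
    set T := cs.takeWhile (fun c => !PySem.Chars.isalpha c) with hT
    have hsplit : cs = T ++ l :: t := by
      rw [hT, ← hD, List.takeWhile_append_dropWhile]
    have hnil : cs ≠ [] := by rw [hsplit]; simp
    rw [hD, if_neg hnil]
    have hcomb : (cs.takeWhile PySem.Chars.isspace).length +
        ((cs.dropWhile PySem.Chars.isspace).takeWhile (fun c => !PySem.Chars.isalpha c)).length
        = T.length := by
      have := congrArg List.length (pv_tw_combine cs)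
      rw [List.length_append] at this
      rw [hT, this]
    simp only [pv_ws_loop_eq, Nat.zero_add, pv_punc_loop_eq, pv_drop_takeWhile]
    rw [hcomb]
    have hlen : cs.length = T.length + 1 + t.length := by rw [hsplit]; simp; omega
    rw [if_neg (by omega)]
    have hdrop1 : cs.drop (T.length + 1) = t := by
      rw [hsplit, ← List.singleton_append, ← List.append_assoc, List.drop_left' (by simp)]
    have hletter : cs.getD T.length ' ' = l := by
      rw [hsplit, List.getD_eq_getElem?_getD, List.getElem?_append_right (by omega)]
      simp
    set k := (t.takeWhile PySem.Chars.isalpha).length with hkdef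
    have hword : pvAWordLoop (cs.drop (T.length + 1)) (T.length + 1) = T.length + 1 + k := by
      rw [hdrop1, pv_word_loop_eq]
    rw [hword, hletter]
    have htail : PySem.List.slice cs (some ((T.length + 1 : Nat) : Int))
        (some ((T.length + 1 + k : Nat) : Int)) = t.takeWhile PySem.Chars.isalpha := by
      rw [PySem.List.slice_natCast, hdrop1]
      have : T.length + 1 + k - (T.length + 1) = k := by omega
      rw [this, hkdef, pv_take_takeWhile]
    have hrem : PySem.List.slice cs (some ((T.length + 1 + k : Nat) : Int)) none =
        t.dropWhile PySem.Chars.isalpha := by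
      rw [PySem.List.slice_from_natCast]
      have h1 : List.drop (T.length + 1 + k) cs = List.drop k t := by
        rw [← hdrop1, List.drop_drop]
      rw [h1, hkdef, pv_drop_takeWhile]
    have hbody : PySem.List.slice cs none (some ((cs.takeWhile PySem.Chars.isspace).length : Int)) ++
        ((cs.dropWhile PySem.Chars.isspace).takeWhile (fun c => !PySem.Chars.isalpha c)) = T := by
      rw [PySem.List.slice_to_natCast, pv_take_takeWhile, pv_tw_combine, hT]
    have hcons : PySem.List.slice cs none (some ((T.length + 1 + k : Nat) : Int)) =
        T ++ l :: t.takeWhile PySem.Chars.isalpha := by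
      rw [PySem.List.slice_to_natCast, hsplit, List.take_append,
        List.take_of_length_le (by omega), show T.length + 1 + k - T.length = k + 1 by omega]
      congr 1
      simp only [List.take_succ_cons, List.cons.injEq, true_and]
      rw [hkdef, pv_take_takeWhile]
    rw [htail, hrem, hcons, hbody]
    simp

lemma pv_head_dropWhile (p : Char → Bool) (l : List Char) (c : Char) (t : List Char)
    (h : l.dropWhile p = c :: t) : p c = false := by
  induction l with
  | nil => simp at h
  | cons a l ih =>
    by_cases q : p a = true
    · rw [List.dropWhile_cons, if_pos q] at h
      exact ih h
    · rw [List.dropWhile_cons, if_neg q] at h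
      injection h with h1 h2
      subst h1
      simpa using q

-- ---- B = canon ----
lemma pvSpanLoop_eq (a : Bool) (cs : List Char) :
    pvSpanLoop a cs = (cs.takeWhile (fun x => PySem.Chars.isalpha x == a),
      cs.dropWhile (fun x => PySem.Chars.isalpha x == a)) := by
  induction cs with
  | nil => simp [pvSpanLoop]
  | cons c cs ih =>
    by_cases h : PySem.Chars.isalpha c == a
    · simp [pvSpanLoop, h, ih]
    · simp [pvSpanLoop, h]

lemma pvRuns_flatten (cs : List Char) :
    ((pvRuns cs).map Prod.snd).flatten = cs := by
  induction cs using pvRuns.induct with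
  | case1 => simp [pvRuns]
  | case2 c cs a s ih =>
    rw [pvRuns]
    simp only [List.map_cons, List.flatten_cons]
    rw [ih]
    have := pvSpanLoop_eq a cs
    rw [show s = pvSpanLoop a cs from rfl, this]
    simp [List.takeWhile_append_dropWhile]

lemma pv_canon_shift (acc cs : List Char) :
    pvCanon acc cs = pvCanon (acc ++ cs.takeWhile (fun c => !PySem.Chars.isalpha c))
      (cs.dropWhile (fun c => !PySem.Chars.isalpha c)) := by
  unfold pvCanon
  set D := cs.dropWhile (fun c => !PySem.Chars.isalpha c) with hD
  have hsplit : cs = cs.takeWhile (fun c => !PySem.Chars.isalpha c) ++ D := by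
    rw [hD, List.takeWhile_append_dropWhile]
  cases hDc : D with
  | nil =>
    have htw : List.takeWhile (fun c => !PySem.Chars.isalpha c) cs = cs := by
      conv_rhs => rw [hsplit]
      rw [hDc, List.append_nil]
    simp only [List.dropWhile_nil, htw, List.append_nil]
  | cons l t =>
    have hl : PySem.Chars.isalpha l = true := by
      have := pv_head_dropWhile _ _ _ _ (hD.symm.trans hDc)
      simpa using this
    have h1 : (l :: t).dropWhile (fun c => !PySem.Chars.isalpha c) = l :: t := by
      simp [hl]
    have h2 : (l :: t).takeWhile (fun c => !PySem.Chars.isalpha c) = [] := by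
      simp [hl]
    rw [h1, h2]
    simp [List.append_assoc]

lemma pvB_eq_canon (cs : List Char) (parts : List (List Char)) :
    pvAssemble (pvRuns cs) parts = pvCanon parts.flatten cs := by
  induction cs using pvRuns.induct generalizing parts with
  | case1 => simp [pvRuns, pvAssemble, pvCanon]
  | case2 c cs a s ih =>
    rw [pvRuns]
    rw [show s = pvSpanLoop a cs from rfl, show a = PySem.Chars.isalpha c from rfl] at *
    rw [pvSpanLoop_eq] at *
    by_cases ha : PySem.Chars.isalpha c = true
    · -- alpha run is first: assemble stops here
      rw [pvAssemble]
      simp only [ha, if_pos]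
      rw [pvRuns_flatten]
      have hpred : (fun x => PySem.Chars.isalpha x == PySem.Chars.isalpha c)
          = PySem.Chars.isalpha := by
        funext x; rw [ha]; simp
      unfold pvCanon
      have hdc : (c :: cs).dropWhile (fun x => !PySem.Chars.isalpha x) = c :: cs := by
        simp [ha]
      have htc : (c :: cs).takeWhile (fun x => !PySem.Chars.isalpha x) = [] := by
        simp [ha]
      rw [hdc]
      simp only [htc]
      simp [PySem.List.pyGet?, PySem.List.pyIdx?]
    · -- non-alpha run: recurse with before ++ chunk
      simp only [Bool.not_eq_true] at ha
      rw [pvAssemble]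
      simp only [ha, Bool.false_eq_true, ite_false]
      have hpred : (fun x => PySem.Chars.isalpha x == false)
          = (fun x => !PySem.Chars.isalpha x) := by
        funext x; cases h : PySem.Chars.isalpha x <;> simp
      dsimp only at ih
      rw [ha] at ih
      rw [ih, hpred]
      have hshift := pv_canon_shift parts.flatten (c :: cs)
      rw [List.takeWhile_cons, List.dropWhile_cons] at hshift
      simp only [ha, Bool.not_false, if_pos] at hshift
      rw [hshift]
      simp

-- ===== VERDICT (by name: the statement is the Claim_ definition above) =====
theorem extract_dropcap_py_spec : Claim_equal_extract_dropcap_py := by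
  intro text _
  unfold Spec_extract_dropcap_py extract_dropcap_py_alt
  rw [pvA_eq_canon, pvB_eq_canon]
  rfl
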